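-- pv_equiv track=rewrite | github.com/LongKim11/TicTacToe-8x8-Problem-in-AI | problem.py | get_diagonal_helper
-- ===== SOURCE A (Python) =====
-- def get_diagonal_helper(board):
--     n = len(board)
--     diagonals_1 = []  # lower-left-to-upper-right diagonals
--     diagonals_2 = []  # upper-left-to-lower-right diagonals
--     for p in range(2 * n - 1):
--         diagonals_1.append([board[p - q][q] for q in range(max(0, p - n + 1), min(p, n - 1) + 1)])
--         diagonals_2.append([board[n - p + q - 1][q] for q in range(max(0, p - n + 1), min(p, n - 1) + 1)])
--     for _ in range(3):
--         diagonals_1.pop()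
--         diagonals_1.pop(0)
--
--         diagonals_2.pop()
--         diagonals_2.pop(0)
--
--     return diagonals_1, diagonals_2
-- ===== SOURCE B (Python) =====
-- def get_diagonal_helper(board):
--     n = len(board)
--     # single scatter pass: bucket each cell by its diagonal index
--     diagonals_1 = [[] for _ in range(2 * n - 1)]
--     diagonals_2 = [[] for _ in range(2 * n - 1)]
--     for c in range(n):
--         for r in range(n):
--             v = board[r][c]
--             diagonals_1[r + c].append(v)
--             diagonals_2[n - 1 - r + c].append(v)
--     for _ in range(3):
--         diagonals_1.pop()
--         diagonals_1.pop(0)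
--         diagonals_2.pop()
--         diagonals_2.pop(0)
--     return diagonals_1, diagonals_2
-- ===== Notes on version B (the rewrite author's own statement) =====
-- stated objective: alternative
-- what changed: B replaces A's per-diagonal gather comprehensions with a single scatter pass that buckets every cell board[r][c] into pre-allocated lists at diagonal indices r+c and n-1-r+c; the trimming of three diagonals from each end is unchanged.
import Mathlib
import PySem

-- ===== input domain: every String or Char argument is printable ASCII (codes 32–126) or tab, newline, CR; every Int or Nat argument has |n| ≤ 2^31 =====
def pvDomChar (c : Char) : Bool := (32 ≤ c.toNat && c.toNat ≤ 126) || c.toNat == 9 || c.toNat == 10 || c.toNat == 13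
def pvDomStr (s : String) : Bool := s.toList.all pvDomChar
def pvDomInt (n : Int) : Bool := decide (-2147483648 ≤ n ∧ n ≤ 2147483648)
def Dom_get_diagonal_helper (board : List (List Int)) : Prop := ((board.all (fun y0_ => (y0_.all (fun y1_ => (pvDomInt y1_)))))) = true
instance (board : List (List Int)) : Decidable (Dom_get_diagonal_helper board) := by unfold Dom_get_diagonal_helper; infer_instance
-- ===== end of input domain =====

-- B replaces A's per-diagonal gather comprehensions with a single scatter pass bucketing each
-- cell by its diagonal index; the end-trimming pops are unchanged (objective: alternative).

-- ===== PORT A =====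
-- the p-loop appends one gathered diagonal per step to each of the two lists;
-- board[p-q][q] / board[n-p+q-1][q] are in range wherever Python returns (Pre_), so pyGetD is exact there
def get_diagonal_helper (board : List (List Int)) : List (List Int) × List (List Int) :=
  let n : Int := board.length
  let dd := (PySem.List.pyRange 0 (2 * n - 1) 1).foldl
    (fun (acc : List (List Int) × List (List Int)) p =>
      (acc.1 ++ [(PySem.List.pyRange (max 0 (p - n + 1)) (min p (n - 1) + 1) 1).map
                   (fun q => PySem.List.pyGetD (PySem.List.pyGetD board (p - q) []) q 0)],
       acc.2 ++ [(PySem.List.pyRange (max 0 (p - n + 1)) (min p (n - 1) + 1) 1).map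
                   (fun q => PySem.List.pyGetD (PySem.List.pyGetD board (n - p + q - 1) []) q 0)]))
    ([], [])
  -- 'for _ in range(3): pop(); pop(0)': pop raises IndexError on a too-short list (outside Pre_);
  -- where Python returns, pop() is dropLast and pop(0) is drop 1
  let trim := fun (l : List (List Int)) => (List.range 3).foldl (fun acc _ => acc.dropLast.drop 1) l
  (trim dd.1, trim dd.2)

-- ===== PORT B =====
def get_diagonal_helper_alt (board : List (List Int)) : List (List Int) × List (List Int) :=
  let n := board.length
  let dd := (List.range n).foldl (fun (s : List (List Int) × List (List Int)) (c : Nat) =>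
      (List.range n).foldl (fun (s : List (List Int) × List (List Int)) (r : Nat) =>
        let v := PySem.List.pyGetD (PySem.List.pyGetD board (r : Int) []) (c : Int) 0
        (s.1.set (r + c) (s.1.getD (r + c) [] ++ [v]),
         s.2.set (n - 1 - r + c) (s.2.getD (n - 1 - r + c) [] ++ [v]))) s)
    (List.replicate (2 * n - 1) [], List.replicate (2 * n - 1) [])
  -- the same six pops as A: pop raises IndexError on a too-short list (outside Pre_)
  let trim := fun (l : List (List Int)) => (List.range 3).foldl (fun acc _ => acc.dropLast.drop 1) l
  (trim dd.1, trim dd.2)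

-- ===== PRECONDITION & SPEC =====
-- Pre_: exactly the inputs where Python A returns — at least 4 rows (else the six pops hit a
-- too-short diagonal list and raise IndexError) and every row at least as long as the board is
-- tall (every column index 0..n-1 of every row is read; a shorter row raises IndexError)
def Pre_get_diagonal_helper (board : List (List Int)) : Prop :=
  4 ≤ board.length ∧ ∀ row ∈ board, board.length ≤ row.length
instance (board : List (List Int)) : Decidable (Pre_get_diagonal_helper board) := by
  unfold Pre_get_diagonal_helper; infer_instance

def pvWitness_get_diagonal_helper : List (List Int) :=
  [[1, 2, 3, 4], [5, 6, 7, 8], [9, 10, 11, 12], [13, 14, 15, 16]]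

def Spec_get_diagonal_helper (board : List (List Int)) (out : List (List Int) × List (List Int)) : Prop := out = get_diagonal_helper_alt board
instance (board : List (List Int)) (out : List (List Int) × List (List Int)) : Decidable (Spec_get_diagonal_helper board out) := by unfold Spec_get_diagonal_helper; infer_instance

-- ===== CLAIM (what is proved, stated in full; the proofs are below) =====
def Claim_equal_get_diagonal_helper : Prop := ∀ (board : List (List Int)), Dom_get_diagonal_helper board → Pre_get_diagonal_helper board → Spec_get_diagonal_helper board (get_diagonal_helper board)


-- ===== LEMMAS AND PROOFS =====

-- getD after set, spelled out
theorem gdhGetD_set (l : List (List Int)) (i j : Nat) (v : List Int) :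
    (l.set i v).getD j [] = if i = j ∧ i < l.length then v else l.getD j [] := by
  rw [List.getD_eq_getElem?_getD, List.getElem?_set]
  by_cases hij : i = j
  · subst hij
    by_cases hlen : i < l.length
    · rw [if_pos rfl, if_pos hlen, if_pos ⟨rfl, hlen⟩]
      rfl
    · rw [if_pos rfl, if_neg hlen, if_neg (fun h => hlen h.2),
          List.getD_eq_default _ _ (by omega)]
      rfl
  · rw [if_neg hij, if_neg (fun h => hij h.1), List.getD_eq_getElem?_getD]

-- A's p-loop builds the two diagonal lists independently
theorem gdhSplitAppend {α β : Type} (l : List β) (f g : β → α) : ∀ (a b : List α),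
    l.foldl (fun acc x => (acc.1 ++ [f x], acc.2 ++ [g x])) (a, b)
      = (a ++ l.map f, b ++ l.map g) := by
  induction l with
  | nil => intro a b; simp
  | cons x t ih =>
    intro a b
    rw [List.foldl_cons]
    dsimp only
    rw [ih]
    simp

-- B's inner row loop updates the two bucket lists independently
-- (PySem.List.foldl_prod_mk does not apply: the components are read through projections)
theorem gdhBsplitInner (board : List (List Int)) (c : Nat) (l2 : List Nat) :
    ∀ (a b : List (List Int)),
    l2.foldl (fun (s : List (List Int) × List (List Int)) (r : Nat) =>
        (s.1.set (r + c) (s.1.getD (r + c) [] ++ [(board.getD r []).getD c 0]),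
         s.2.set (board.length - 1 - r + c)
           (s.2.getD (board.length - 1 - r + c) [] ++ [(board.getD r []).getD c 0]))) (a, b)
      = (l2.foldl (fun d r => d.set (r + c) (d.getD (r + c) [] ++ [(board.getD r []).getD c 0])) a,
         l2.foldl (fun d r => d.set (board.length - 1 - r + c)
           (d.getD (board.length - 1 - r + c) [] ++ [(board.getD r []).getD c 0])) b) := by
  induction l2 with
  | nil => intro a b; rfl
  | cons r t ih =>
    intro a b
    rw [List.foldl_cons, List.foldl_cons, List.foldl_cons]
    exact ih _ _

-- B's whole scatter pass splits into the two one-sided scatter passes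
theorem gdhBsplit (board : List (List Int)) (l1 : List Nat) :
    ∀ (a b : List (List Int)),
    l1.foldl (fun (s : List (List Int) × List (List Int)) (c : Nat) =>
        (List.range board.length).foldl (fun (s : List (List Int) × List (List Int)) (r : Nat) =>
          (s.1.set (r + c) (s.1.getD (r + c) [] ++ [(board.getD r []).getD c 0]),
           s.2.set (board.length - 1 - r + c)
             (s.2.getD (board.length - 1 - r + c) [] ++ [(board.getD r []).getD c 0]))) s) (a, b)
      = (l1.foldl (fun d c => (List.range board.length).foldl
            (fun d r => d.set (r + c) (d.getD (r + c) [] ++ [(board.getD r []).getD c 0])) d) a,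
         l1.foldl (fun d c => (List.range board.length).foldl
            (fun d r => d.set (board.length - 1 - r + c)
              (d.getD (board.length - 1 - r + c) [] ++ [(board.getD r []).getD c 0])) d) b) := by
  induction l1 with
  | nil => intro a b; rfl
  | cons c t ih =>
    intro a b
    rw [List.foldl_cons, List.foldl_cons, List.foldl_cons]
    rw [gdhBsplitInner]
    exact ih _ _

-- a scatter column preserves the number of buckets
theorem gdhScatter_length (idx : Nat → Nat) (w : Nat → Int) (m : Nat) (ds : List (List Int)) :
    ((List.range m).foldl (fun d r => d.set (idx r) (d.getD (idx r) [] ++ [w r])) ds).length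
      = ds.length := by
  induction m with
  | zero => rfl
  | succ m ih =>
    rw [List.range_succ, List.foldl_append, List.foldl_cons, List.foldl_nil, List.length_set, ih]

-- a bucket no row of the column maps to is untouched
theorem gdhScatter_miss (idx : Nat → Nat) (w : Nat → Int) (m : Nat) (ds : List (List Int)) (j : Nat)
    (hmiss : ∀ r, r < m → idx r ≠ j) :
    ((List.range m).foldl (fun d r => d.set (idx r) (d.getD (idx r) [] ++ [w r])) ds).getD j []
      = ds.getD j [] := by
  induction m with
  | zero => rfl
  | succ m ih =>
    rw [List.range_succ, List.foldl_append, List.foldl_cons, List.foldl_nil, gdhGetD_set]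
    rw [if_neg (by have := hmiss m (by omega); tauto)]
    exact ih (fun r hr => hmiss r (by omega))

-- the bucket row r0 of the column maps to receives exactly one appended value
theorem gdhScatter_hit (idx : Nat → Nat) (w : Nat → Int) (m : Nat) (ds : List (List Int))
    (j r0 : Nat) (hr0 : r0 < m) (hj : idx r0 = j)
    (hidx : ∀ r, r < m → idx r < ds.length)
    (hinj : ∀ r1, r1 < m → ∀ r2, r2 < m → idx r1 = idx r2 → r1 = r2) :
    ((List.range m).foldl (fun d r => d.set (idx r) (d.getD (idx r) [] ++ [w r])) ds).getD j []
      = ds.getD j [] ++ [w r0] := by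
  induction m with
  | zero => omega
  | succ m ih =>
    rw [List.range_succ, List.foldl_append, List.foldl_cons, List.foldl_nil, gdhGetD_set]
    by_cases hcase : r0 = m
    · subst hcase
      rw [if_pos ⟨hj, by rw [gdhScatter_length]; exact hidx r0 (by omega)⟩, hj,
          gdhScatter_miss idx w r0 ds j
            (by intro r hr hrj
                have := hinj r (by omega) r0 (by omega) (hrj.trans hj.symm)
                omega)]
    · have hne : idx m ≠ j := fun h => hcase (hinj r0 (by omega) m (by omega) (hj.trans h.symm))
      rw [if_neg (by tauto)]
      exact ih (by omega) (fun r hr => hidx r (by omega))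
        (fun r1 h1 r2 h2 => hinj r1 (by omega) r2 (by omega))

-- B's scatter, side 1: number of buckets
theorem gdhB1_length (board : List (List Int)) (C : Nat) :
    (((List.range C).foldl
        (fun d c => (List.range board.length).foldl
          (fun d r => d.set (r + c) (d.getD (r + c) [] ++ [(board.getD r []).getD c 0])) d)
        (List.replicate (2 * board.length - 1) []))).length
      = 2 * board.length - 1 := by
  induction C with
  | zero => simp
  | succ C ih =>
    rw [List.range_succ, List.foldl_append, List.foldl_cons, List.foldl_nil]
    rw [gdhScatter_length, ih]

-- B's scatter, side 2: number of buckets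
theorem gdhB2_length (board : List (List Int)) (C : Nat) :
    (((List.range C).foldl
        (fun d c => (List.range board.length).foldl
          (fun d r => d.set (board.length - 1 - r + c)
            (d.getD (board.length - 1 - r + c) [] ++ [(board.getD r []).getD c 0])) d)
        (List.replicate (2 * board.length - 1) []))).length
      = 2 * board.length - 1 := by
  induction C with
  | zero => simp
  | succ C ih =>
    rw [List.range_succ, List.foldl_append, List.foldl_cons, List.foldl_nil]
    rw [gdhScatter_length, ih]

-- B's scatter, side 1: bucket contents after the first C columns
theorem gdhB1_getD (board : List (List Int)) (hn : 1 ≤ board.length) (C : Nat)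
    (hC : C ≤ board.length) (j : Nat) :
    (((List.range C).foldl
        (fun d c => (List.range board.length).foldl
          (fun d r => d.set (r + c) (d.getD (r + c) [] ++ [(board.getD r []).getD c 0])) d)
        (List.replicate (2 * board.length - 1) []))).getD j []
      = (List.range C).filterMap
          (fun c => if c ≤ j ∧ j < board.length + c
                    then some ((board.getD (j - c) []).getD c 0) else none) := by
  induction C with
  | zero => simp
  | succ C ih =>
    rw [List.range_succ, List.foldl_append, List.foldl_cons, List.foldl_nil,
        List.filterMap_append]
    by_cases hhit : C ≤ j ∧ j < board.length + C
    · rw [gdhScatter_hit (fun r => r + C) (fun r => (board.getD r []).getD C 0)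
            board.length _ j (j - C) (by omega) (by show j - C + C = j; omega)
            (by intro r hr; show r + C < _; rw [gdhB1_length]; omega)
            (by intro r1 h1 r2 h2 h; have h' : r1 + C = r2 + C := h; omega)]
      rw [ih (by omega)]
      simp [hhit]
    · rw [gdhScatter_miss (fun r => r + C) (fun r => (board.getD r []).getD C 0)
            board.length _ j (by intro r hr; show r + C ≠ j; omega)]
      rw [ih (by omega)]
      simp [hhit]

-- B's scatter, side 2: bucket contents after the first C columns
theorem gdhB2_getD (board : List (List Int)) (hn : 1 ≤ board.length) (C : Nat)
    (hC : C ≤ board.length) (j : Nat) :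
    (((List.range C).foldl
        (fun d c => (List.range board.length).foldl
          (fun d r => d.set (board.length - 1 - r + c)
            (d.getD (board.length - 1 - r + c) [] ++ [(board.getD r []).getD c 0])) d)
        (List.replicate (2 * board.length - 1) []))).getD j []
      = (List.range C).filterMap
          (fun c => if c ≤ j ∧ j ≤ board.length - 1 + c
                    then some ((board.getD (board.length - 1 + c - j) []).getD c 0) else none) := by
  induction C with
  | zero => simp
  | succ C ih =>
    rw [List.range_succ, List.foldl_append, List.foldl_cons, List.foldl_nil,
        List.filterMap_append]
    by_cases hhit : C ≤ j ∧ j ≤ board.length - 1 + C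
    · rw [gdhScatter_hit (fun r => board.length - 1 - r + C)
            (fun r => (board.getD r []).getD C 0)
            board.length _ j (board.length - 1 + C - j) (by omega)
            (by show board.length - 1 - (board.length - 1 + C - j) + C = j; omega)
            (by intro r hr; show board.length - 1 - r + C < _; rw [gdhB2_length]; omega)
            (by intro r1 h1 r2 h2 h
                have h' : board.length - 1 - r1 + C = board.length - 1 - r2 + C := h
                omega)]
      rw [ih (by omega)]
      simp [hhit]
    · rw [gdhScatter_miss (fun r => board.length - 1 - r + C)
            (fun r => (board.getD r []).getD C 0)
            board.length _ j (by intro r hr; show board.length - 1 - r + C ≠ j; omega)]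
      rw [ih (by omega)]
      simp [hhit]

-- filterMap of a one-sided bound over a range is a shifted map
theorem gdhFm_tail {α : Type} (N lo : Nat) (f : Nat → α) :
    (List.range N).filterMap (fun c => if lo ≤ c then some (f c) else none)
      = (List.range (N - lo)).map (fun k => f (lo + k)) := by
  induction N with
  | zero => simp
  | succ N ih =>
    rw [List.range_succ, List.filterMap_append, ih]
    by_cases h : lo ≤ N
    · rw [show N + 1 - lo = (N - lo) + 1 from by omega, List.range_succ, List.map_append]
      simp only [List.filterMap_cons, List.filterMap_nil, if_pos h, List.map_cons, List.map_nil]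
      rw [show lo + (N - lo) = N from by omega]
    · rw [show N + 1 - lo = 0 from by omega, show N - lo = 0 from by omega]
      simp [if_neg h]

-- filterMap of an interval bound over a range is a map over the interval
theorem gdhFm_interval {α : Type} (N lo hi : Nat) (f : Nat → α) (hhi : hi < N) :
    (List.range N).filterMap (fun c => if lo ≤ c ∧ c ≤ hi then some (f c) else none)
      = (List.range (hi + 1 - lo)).map (fun k => f (lo + k)) := by
  induction N with
  | zero => omega
  | succ N ih =>
    rw [List.range_succ, List.filterMap_append]
    by_cases h : hi = N
    · subst h
      rw [List.filterMap_congr (g := fun c => if lo ≤ c then some (f c) else none)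
          (by intro a ha; rw [List.mem_range] at ha; simp [show a ≤ hi from by omega]),
          gdhFm_tail]
      by_cases hlo : lo ≤ hi
      · rw [show hi + 1 - lo = (hi - lo) + 1 from by omega, List.range_succ, List.map_append]
        simp [hlo, show lo + (hi - lo) = hi from by omega]
      · rw [show hi + 1 - lo = 0 from by omega, show hi - lo = 0 from by omega]
        simp [hlo]
    · rw [ih (by omega)]
      simp only [List.filterMap_cons, List.filterMap_nil]
      rw [if_neg (by omega)]
      simp

-- one diagonal of A, side 1, equals B's bucket
theorem gdhBucket1 (board : List (List Int)) (hn : 1 ≤ board.length) (j : Nat)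
    (_hj : j < 2 * board.length - 1) :
    (PySem.List.pyRange (max 0 ((j : Int) - (board.length : Int) + 1))
        (min (j : Int) ((board.length : Int) - 1) + 1) 1).map
      (fun q => PySem.List.pyGetD (PySem.List.pyGetD board ((j : Int) - q) []) q 0)
      = (List.range board.length).filterMap
          (fun c => if c ≤ j ∧ j < board.length + c
                    then some ((board.getD (j - c) []).getD c 0) else none) := by
  rw [show max 0 ((j : Int) - (board.length : Int) + 1)
        = ((j + 1 - board.length : Nat) : Int) from by omega]
  rw [show min (j : Int) ((board.length : Int) - 1) + 1
        = ((min j (board.length - 1) + 1 : Nat) : Int) from by omega]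
  rw [PySem.List.pyRange_one, List.map_map]
  rw [show (((min j (board.length - 1) + 1 : Nat) : Int)
        - ((j + 1 - board.length : Nat) : Int)).toNat
        = min j (board.length - 1) + 1 - (j + 1 - board.length) from by omega]
  rw [List.filterMap_congr
      (g := fun c => if j + 1 - board.length ≤ c ∧ c ≤ min j (board.length - 1)
                     then some ((board.getD (j - c) []).getD c 0) else none)
      (by
        intro c hc
        rw [List.mem_range] at hc
        dsimp only
        by_cases h1 : c ≤ j ∧ j < board.length + c
        · rw [if_pos h1, if_pos (by omega)]
        · rw [if_neg h1, if_neg (by omega)])]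
  rw [gdhFm_interval board.length _ _ _ (by omega)]
  apply List.map_congr_left
  intro k hk
  rw [List.mem_range] at hk
  have e1 : ((j + 1 - board.length : Nat) : Int) + (k : Int)
      = ((j + 1 - board.length + k : Nat) : Int) := by push_cast; ring
  have e2 : (j : Int) - ((j + 1 - board.length + k : Nat) : Int)
      = ((j - (j + 1 - board.length + k) : Nat) : Int) := by omega
  simp only [Function.comp_apply, e1, e2, PySem.List.pyGetD_natCast]

-- one diagonal of A, side 2, equals B's bucket
theorem gdhBucket2 (board : List (List Int)) (hn : 1 ≤ board.length) (j : Nat)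
    (_hj : j < 2 * board.length - 1) :
    (PySem.List.pyRange (max 0 ((j : Int) - (board.length : Int) + 1))
        (min (j : Int) ((board.length : Int) - 1) + 1) 1).map
      (fun q => PySem.List.pyGetD (PySem.List.pyGetD board
        ((board.length : Int) - (j : Int) + q - 1) []) q 0)
      = (List.range board.length).filterMap
          (fun c => if c ≤ j ∧ j ≤ board.length - 1 + c
                    then some ((board.getD (board.length - 1 + c - j) []).getD c 0) else none) := by
  rw [show max 0 ((j : Int) - (board.length : Int) + 1)
        = ((j + 1 - board.length : Nat) : Int) from by omega]
  rw [show min (j : Int) ((board.length : Int) - 1) + 1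
        = ((min j (board.length - 1) + 1 : Nat) : Int) from by omega]
  rw [PySem.List.pyRange_one, List.map_map]
  rw [show (((min j (board.length - 1) + 1 : Nat) : Int)
        - ((j + 1 - board.length : Nat) : Int)).toNat
        = min j (board.length - 1) + 1 - (j + 1 - board.length) from by omega]
  rw [List.filterMap_congr
      (g := fun c => if j + 1 - board.length ≤ c ∧ c ≤ min j (board.length - 1)
                     then some ((board.getD (board.length - 1 + c - j) []).getD c 0) else none)
      (by
        intro c hc
        rw [List.mem_range] at hc
        dsimp only
        by_cases h1 : c ≤ j ∧ j ≤ board.length - 1 + c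
        · rw [if_pos h1, if_pos (by omega)]
        · rw [if_neg h1, if_neg (by omega)])]
  rw [gdhFm_interval board.length _ _ _ (by omega)]
  apply List.map_congr_left
  intro k hk
  rw [List.mem_range] at hk
  have e1 : ((j + 1 - board.length : Nat) : Int) + (k : Int)
      = ((j + 1 - board.length + k : Nat) : Int) := by push_cast; ring
  have e2 : (board.length : Int) - (j : Int) + ((j + 1 - board.length + k : Nat) : Int) - 1
      = ((board.length - 1 + (j + 1 - board.length + k) - j : Nat) : Int) := by omega
  simp only [Function.comp_apply, e1, e2, PySem.List.pyGetD_natCast]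

-- ===== VERDICT (by name: the statement is the Claim_ definition above) =====
theorem get_diagonal_helper_spec : Claim_equal_get_diagonal_helper := by
  intro board _ hpre
  obtain ⟨hn, _⟩ := hpre
  have hn1 : 1 ≤ board.length := by omega
  show get_diagonal_helper board = get_diagonal_helper_alt board
  simp only [get_diagonal_helper, get_diagonal_helper_alt, gdhSplitAppend,
             List.nil_append, PySem.List.pyGetD_natCast]
  rw [gdhBsplit]
  dsimp only
  rw [show (2 * ((board.length : Nat) : Int) - 1 : Int)
        = ((2 * board.length - 1 : Nat) : Int) from by omega]
  rw [PySem.List.pyRange_zero_nat]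
  simp only [List.map_map]
  simp only [Prod.mk.injEq]
  constructor
  · congr 1
    apply List.ext_getElem?
    intro j
    by_cases hj : j < 2 * board.length - 1
    · simp only [List.getElem?_map, List.getElem?_range hj]
      dsimp only [Option.map, Function.comp]
      rw [List.getElem?_eq_getElem (by rw [gdhB1_length]; exact hj)]
      congr 1
      rw [← List.getD_eq_getElem _ [] (by rw [gdhB1_length]; exact hj)]
      rw [gdhB1_getD board hn1 board.length le_rfl j]
      exact gdhBucket1 board hn1 j hj
    · rw [List.getElem?_eq_none (by simp only [List.length_map, List.length_range]; omega),
          List.getElem?_eq_none (by rw [gdhB1_length]; omega)]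
  · congr 1
    apply List.ext_getElem?
    intro j
    by_cases hj : j < 2 * board.length - 1
    · simp only [List.getElem?_map, List.getElem?_range hj]
      dsimp only [Option.map, Function.comp]
      rw [List.getElem?_eq_getElem (by rw [gdhB2_length]; exact hj)]
      congr 1
      rw [← List.getD_eq_getElem _ [] (by rw [gdhB2_length]; exact hj)]
      rw [gdhB2_getD board hn1 board.length le_rfl j]
      exact gdhBucket2 board hn1 j hj
    · rw [List.getElem?_eq_none (by simp only [List.length_map, List.length_range]; omega),
          List.getElem?_eq_none (by rw [gdhB2_length]; omega)]
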